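-- pv_equiv track=rewrite | github.com/m-rishabh-007/Platform_questions | 31_oct/problem_10_simple_chatbot/solution.py | chatbotResponses
-- ===== SOURCE A (Python) =====
-- def chatbotResponses(messages):
--     """
--     :type messages: List[str]
--     :rtype: List[str]
--     """
--     responses = []
--
--     for msg in messages:
--         msg_lower = msg.lower()
--         msg_words = set(msg_lower.split())
--
--         # Check for greetings (as separate words or at start)
--         if any(word in msg_words for word in ["hello", "hi", "hey"]) or msg_lower.startswith("hello") or msg_lower.startswith("hi") or msg_lower.startswith("hey"):
--             responses.append("Hi there! How can I help you?")
--         # Check for farewells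
--         elif any(word in msg_words for word in ["bye", "goodbye", "exit"]) or "bye" in msg_lower:
--             responses.append("Goodbye! Have a great day!")
--         # Check for weather keywords
--         elif any(keyword in msg_lower for keyword in ["weather", "temperature", "forecast"]):
--             responses.append("I'm sorry, I can't check the weather, but it's always nice to go outside!")
--         # Check for name/identity
--         elif "name" in msg_lower or "who are you" in msg_lower:
--             responses.append("I'm a simple chatbot created to assist you.")
--         # Check for help keywords
--         elif any(keyword in msg_lower for keyword in ["help", "assist", "support"]):
--             responses.append("I can chat with you! Try asking about the weather or saying hello.")
--         else:
--             responses.append("I'm not sure I understand. Can you rephrase that?")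
--
--     return responses
-- ===== SOURCE B (Python) =====
-- # Flat keyword table: each atomic check is (match_kind, pattern, category).
-- # The reply for a message is the response of the SMALLEST matching category
-- # (categories are numbered by A's branch priority), found in one pass over
-- # the table with a running minimum instead of an if/elif cascade.
-- WORD, PREFIX, SUB = 0, 1, 2
--
-- TABLE = [
--     (WORD, "hello", 0), (WORD, "hi", 0), (WORD, "hey", 0),
--     (PREFIX, "hello", 0), (PREFIX, "hi", 0), (PREFIX, "hey", 0),
--     (WORD, "bye", 1), (WORD, "goodbye", 1), (WORD, "exit", 1), (SUB, "bye", 1),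
--     (SUB, "weather", 2), (SUB, "temperature", 2), (SUB, "forecast", 2),
--     (SUB, "name", 3), (SUB, "who are you", 3),
--     (SUB, "help", 4), (SUB, "assist", 4), (SUB, "support", 4),
-- ]
--
-- RESPONSES = [
--     "Hi there! How can I help you?",
--     "Goodbye! Have a great day!",
--     "I'm sorry, I can't check the weather, but it's always nice to go outside!",
--     "I'm a simple chatbot created to assist you.",
--     "I can chat with you! Try asking about the weather or saying hello.",
--     "I'm not sure I understand. Can you rephrase that?",
-- ]
--
--
-- def _best_category(msg):
--     low = msg.lower()
--     words = set(low.split())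
--     best = len(RESPONSES) - 1  # default category
--     for kind, pat, cat in TABLE:
--         if cat < best:
--             if (kind == WORD and pat in words) or \
--                (kind == PREFIX and low.startswith(pat)) or \
--                (kind == SUB and pat in low):
--                 best = cat
--     return best
--
--
-- def chatbotResponses(messages):
--     """
--     :type messages: List[str]
--     :rtype: List[str]
--     """
--     return [RESPONSES[_best_category(m)] for m in messages]
-- ===== Notes on version B (the rewrite author's own statement) =====
-- stated objective: alternative
-- what changed: Replaces the if/elif cascade with a flat keyword table of (match-kind, pattern, category) atoms scanned once per message while keeping the minimum matching category as a running accumulator; the response is then a single indexed lookup into a response list.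
import Mathlib
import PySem

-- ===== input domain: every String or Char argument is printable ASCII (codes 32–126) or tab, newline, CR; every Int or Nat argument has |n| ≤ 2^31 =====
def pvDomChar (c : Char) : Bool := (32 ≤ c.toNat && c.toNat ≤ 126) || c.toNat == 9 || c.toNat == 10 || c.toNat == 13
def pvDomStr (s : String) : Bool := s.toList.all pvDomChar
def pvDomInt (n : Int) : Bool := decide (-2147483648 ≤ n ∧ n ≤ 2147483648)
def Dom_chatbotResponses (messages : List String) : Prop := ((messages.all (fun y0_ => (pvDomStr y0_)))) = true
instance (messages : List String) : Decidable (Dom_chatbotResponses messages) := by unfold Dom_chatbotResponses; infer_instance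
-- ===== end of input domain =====

-- B replaces A's if/elif cascade by a flat keyword table of atomic checks tagged with a
-- category number, scanned once per message keeping the minimum matching category.

-- ===== PORT A =====
-- A: a for-loop appending one canned response per message, chosen by an if/elif cascade.
def chatbotResponses (messages : List String) : List String :=
  messages.foldl (fun responses msg =>
    let msg_lower := PySem.Str.lower msg
    let msg_words : PySem.Set String := PySem.Set.ofList (PySem.Str.split₀ msg_lower)
    responses ++
      [if (["hello", "hi", "hey"].any (fun word => PySem.Set.contains msg_words word))
          || PySem.Str.startswith msg_lower "hello"
          || PySem.Str.startswith msg_lower "hi"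
          || PySem.Str.startswith msg_lower "hey" then
        "Hi there! How can I help you?"
      else if (["bye", "goodbye", "exit"].any (fun word => PySem.Set.contains msg_words word))
          || PySem.Str.isIn "bye" msg_lower then
        "Goodbye! Have a great day!"
      else if ["weather", "temperature", "forecast"].any
          (fun keyword => PySem.Str.isIn keyword msg_lower) then
        "I'm sorry, I can't check the weather, but it's always nice to go outside!"
      else if PySem.Str.isIn "name" msg_lower || PySem.Str.isIn "who are you" msg_lower then
        "I'm a simple chatbot created to assist you."
      else if ["help", "assist", "support"].any
          (fun keyword => PySem.Str.isIn keyword msg_lower) then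
        "I can chat with you! Try asking about the weather or saying hello."
      else
        "I'm not sure I understand. Can you rephrase that?"]) []

-- ===== PORT B =====
def pvWORD : Nat := 0
def pvPREFIX : Nat := 1
def pvSUB : Nat := 2

-- flat keyword table: (match kind, pattern, category)
def pvTable : List (Nat × String × Nat) :=
  [(pvWORD, "hello", 0), (pvWORD, "hi", 0), (pvWORD, "hey", 0),
   (pvPREFIX, "hello", 0), (pvPREFIX, "hi", 0), (pvPREFIX, "hey", 0),
   (pvWORD, "bye", 1), (pvWORD, "goodbye", 1), (pvWORD, "exit", 1), (pvSUB, "bye", 1),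
   (pvSUB, "weather", 2), (pvSUB, "temperature", 2), (pvSUB, "forecast", 2),
   (pvSUB, "name", 3), (pvSUB, "who are you", 3),
   (pvSUB, "help", 4), (pvSUB, "assist", 4), (pvSUB, "support", 4)]

def pvResponses : List String :=
  ["Hi there! How can I help you?",
   "Goodbye! Have a great day!",
   "I'm sorry, I can't check the weather, but it's always nice to go outside!",
   "I'm a simple chatbot created to assist you.",
   "I can chat with you! Try asking about the weather or saying hello.",
   "I'm not sure I understand. Can you rephrase that?"]

-- the table-scan step of _best_category's for-loop
def pvStep (low : String) (words : PySem.Set String) (best : Nat) (e : Nat × String × Nat) : Nat :=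
  if e.2.2 < best then
    if (e.1 == pvWORD && PySem.Set.contains words e.2.1)
        || (e.1 == pvPREFIX && PySem.Str.startswith low e.2.1)
        || (e.1 == pvSUB && PySem.Str.isIn e.2.1 low) then e.2.2 else best
  else best

-- _best_category: one pass over the table keeping the minimum matching category
def pvBestCategory (msg : String) : Nat :=
  let low := PySem.Str.lower msg
  let words : PySem.Set String := PySem.Set.ofList (PySem.Str.split₀ low)
  pvTable.foldl (pvStep low words) (pvResponses.length - 1)

-- RESPONSES[best]; the index is always < 6, so the .getD "" branch is unreachable
def chatbotResponses_alt (messages : List String) : List String :=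
  messages.map (fun m => (PySem.List.pyGet? pvResponses (pvBestCategory m : Int)).getD "")

-- ===== PRECONDITION & SPEC =====
def Spec_chatbotResponses (messages : List String) (out : List String) : Prop := out = chatbotResponses_alt messages
instance (messages : List String) (out : List String) : Decidable (Spec_chatbotResponses messages out) := by unfold Spec_chatbotResponses; infer_instance

-- ===== CLAIM =====
def Claim_equal_chatbotResponses : Prop := ∀ (messages : List String), Dom_chatbotResponses messages → Spec_chatbotResponses messages (chatbotResponses messages)

-- ===== LEMMAS AND PROOFS =====

-- the cascade of category indices, as a function of the five group conditions
def pvCat (c0 c1 c2 c3 c4 : Bool) : Nat :=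
  if c0 then 0 else if c1 then 1 else if c2 then 2 else if c3 then 3 else if c4 then 4 else 5

-- fold over the greeting group (category 0)
theorem pv_h0 (low : String) (words : PySem.Set String) :
    List.foldl (pvStep low words) 5
      [(pvWORD, "hello", 0), (pvWORD, "hi", 0), (pvWORD, "hey", 0),
       (pvPREFIX, "hello", 0), (pvPREFIX, "hi", 0), (pvPREFIX, "hey", 0)]
    = if (["hello", "hi", "hey"].any (fun word => PySem.Set.contains words word))
          || PySem.Str.startswith low "hello"
          || PySem.Str.startswith low "hi"
          || PySem.Str.startswith low "hey" then 0 else 5 := by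
  cases h1 : PySem.Set.contains words "hello" <;>
  cases h2 : PySem.Set.contains words "hi" <;>
  cases h3 : PySem.Set.contains words "hey" <;>
  cases h4 : PySem.Str.startswith low "hello" <;>
  cases h5 : PySem.Str.startswith low "hi" <;>
  cases h6 : PySem.Str.startswith low "hey" <;>
  simp_all [pvStep, pvWORD, pvPREFIX, pvSUB]

-- fold over the farewell group (category 1) starting from the default
theorem pv_h1 (low : String) (words : PySem.Set String) :
    List.foldl (pvStep low words) 5
      [(pvWORD, "bye", 1), (pvWORD, "goodbye", 1), (pvWORD, "exit", 1), (pvSUB, "bye", 1)]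
    = if (["bye", "goodbye", "exit"].any (fun word => PySem.Set.contains words word))
          || PySem.Str.isIn "bye" low then 1 else 5 := by
  cases h1 : PySem.Set.contains words "bye" <;>
  cases h2 : PySem.Set.contains words "goodbye" <;>
  cases h3 : PySem.Set.contains words "exit" <;>
  cases h4 : PySem.Str.isIn "bye" low <;>
  simp_all [pvStep, pvWORD, pvPREFIX, pvSUB]

-- fold over the weather group (category 2)
theorem pv_h2 (low : String) (words : PySem.Set String) :
    List.foldl (pvStep low words) 5
      [(pvSUB, "weather", 2), (pvSUB, "temperature", 2), (pvSUB, "forecast", 2)]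
    = if ["weather", "temperature", "forecast"].any
          (fun keyword => PySem.Str.isIn keyword low) then 2 else 5 := by
  cases h1 : PySem.Str.isIn "weather" low <;>
  cases h2 : PySem.Str.isIn "temperature" low <;>
  cases h3 : PySem.Str.isIn "forecast" low <;>
  simp_all [pvStep, pvWORD, pvPREFIX, pvSUB]

-- fold over the name group (category 3)
theorem pv_h3 (low : String) (words : PySem.Set String) :
    List.foldl (pvStep low words) 5
      [(pvSUB, "name", 3), (pvSUB, "who are you", 3)]
    = if PySem.Str.isIn "name" low || PySem.Str.isIn "who are you" low then 3 else 5 := by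
  cases h1 : PySem.Str.isIn "name" low <;>
  cases h2 : PySem.Str.isIn "who are you" low <;>
  simp_all [pvStep, pvWORD, pvPREFIX, pvSUB]

-- fold over the help group (category 4)
theorem pv_h4 (low : String) (words : PySem.Set String) :
    List.foldl (pvStep low words) 5
      [(pvSUB, "help", 4), (pvSUB, "assist", 4), (pvSUB, "support", 4)]
    = if ["help", "assist", "support"].any
          (fun keyword => PySem.Str.isIn keyword low) then 4 else 5 := by
  cases h1 : PySem.Str.isIn "help" low <;>
  cases h2 : PySem.Str.isIn "assist" low <;>
  cases h3 : PySem.Str.isIn "support" low <;>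
  simp_all [pvStep, pvWORD, pvPREFIX, pvSUB]

-- the whole table scan computes the index of the first satisfied group condition
theorem pv_fold (low : String) (words : PySem.Set String) :
    List.foldl (pvStep low words) 5 pvTable
    = pvCat
        ((["hello", "hi", "hey"].any (fun word => PySem.Set.contains words word))
          || PySem.Str.startswith low "hello"
          || PySem.Str.startswith low "hi"
          || PySem.Str.startswith low "hey")
        ((["bye", "goodbye", "exit"].any (fun word => PySem.Set.contains words word))
          || PySem.Str.isIn "bye" low)
        (["weather", "temperature", "forecast"].any (fun keyword => PySem.Str.isIn keyword low))
        (PySem.Str.isIn "name" low || PySem.Str.isIn "who are you" low)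
        (["help", "assist", "support"].any (fun keyword => PySem.Str.isIn keyword low)) := by
  have htab : pvTable
      = [(pvWORD, "hello", 0), (pvWORD, "hi", 0), (pvWORD, "hey", 0),
         (pvPREFIX, "hello", 0), (pvPREFIX, "hi", 0), (pvPREFIX, "hey", 0)]
        ++ ([(pvWORD, "bye", 1), (pvWORD, "goodbye", 1), (pvWORD, "exit", 1), (pvSUB, "bye", 1)]
        ++ ([(pvSUB, "weather", 2), (pvSUB, "temperature", 2), (pvSUB, "forecast", 2)]
        ++ ([(pvSUB, "name", 3), (pvSUB, "who are you", 3)]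
        ++ [(pvSUB, "help", 4), (pvSUB, "assist", 4), (pvSUB, "support", 4)]))) := rfl
  rw [htab, List.foldl_append, pv_h0]
  cases hc0 : (["hello", "hi", "hey"].any (fun word => PySem.Set.contains words word))
      || PySem.Str.startswith low "hello"
      || PySem.Str.startswith low "hi"
      || PySem.Str.startswith low "hey"
  · simp only [Bool.false_eq_true, if_false]
    rw [List.foldl_append, pv_h1]
    cases hc1 : (["bye", "goodbye", "exit"].any (fun word => PySem.Set.contains words word))
        || PySem.Str.isIn "bye" low
    · simp only [Bool.false_eq_true, if_false]
      rw [List.foldl_append, pv_h2]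
      cases hc2 : ["weather", "temperature", "forecast"].any
          (fun keyword => PySem.Str.isIn keyword low)
      · simp only [Bool.false_eq_true, if_false]
        rw [List.foldl_append, pv_h3]
        cases hc3 : PySem.Str.isIn "name" low || PySem.Str.isIn "who are you" low
        · simp only [Bool.false_eq_true, if_false]
          rw [pv_h4]
          cases hc4 : ["help", "assist", "support"].any
              (fun keyword => PySem.Str.isIn keyword low)
          · rfl
          · rfl
        · rfl
      · rfl
    · rfl
  · rfl

-- the response cascade is the lookup of the cascade of indices
theorem pv_assemble (c0 c1 c2 c3 c4 : Bool) :
    (if c0 then "Hi there! How can I help you?"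
     else if c1 then "Goodbye! Have a great day!"
     else if c2 then "I'm sorry, I can't check the weather, but it's always nice to go outside!"
     else if c3 then "I'm a simple chatbot created to assist you."
     else if c4 then "I can chat with you! Try asking about the weather or saying hello."
     else "I'm not sure I understand. Can you rephrase that?")
    = (PySem.List.pyGet? pvResponses (pvCat c0 c1 c2 c3 c4 : Int)).getD "" := by
  cases c0 <;> cases c1 <;> cases c2 <;> cases c3 <;> cases c4 <;> rfl

-- per-message agreement: A's cascade = response at B's minimum matching category
theorem pv_respond_eq (msg : String) :
    (let msg_lower := PySem.Str.lower msg
     let msg_words : PySem.Set String := PySem.Set.ofList (PySem.Str.split₀ msg_lower)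
     if (["hello", "hi", "hey"].any (fun word => PySem.Set.contains msg_words word))
        || PySem.Str.startswith msg_lower "hello"
        || PySem.Str.startswith msg_lower "hi"
        || PySem.Str.startswith msg_lower "hey" then
      "Hi there! How can I help you?"
    else if (["bye", "goodbye", "exit"].any (fun word => PySem.Set.contains msg_words word))
        || PySem.Str.isIn "bye" msg_lower then
      "Goodbye! Have a great day!"
    else if ["weather", "temperature", "forecast"].any
        (fun keyword => PySem.Str.isIn keyword msg_lower) then
      "I'm sorry, I can't check the weather, but it's always nice to go outside!"
    else if PySem.Str.isIn "name" msg_lower || PySem.Str.isIn "who are you" msg_lower then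
      "I'm a simple chatbot created to assist you."
    else if ["help", "assist", "support"].any
        (fun keyword => PySem.Str.isIn keyword msg_lower) then
      "I can chat with you! Try asking about the weather or saying hello."
    else
      "I'm not sure I understand. Can you rephrase that?")
    = (PySem.List.pyGet? pvResponses (pvBestCategory msg : Int)).getD "" := by
  rw [show pvBestCategory msg
      = List.foldl (pvStep (PySem.Str.lower msg)
          (PySem.Set.ofList (PySem.Str.split₀ (PySem.Str.lower msg)))) 5 pvTable from rfl,
    pv_fold]
  exact pv_assemble _ _ _ _ _

-- ===== VERDICT =====
theorem chatbotResponses_spec : Claim_equal_chatbotResponses := by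
  intro messages _
  show chatbotResponses messages = chatbotResponses_alt messages
  unfold chatbotResponses chatbotResponses_alt
  rw [PySem.List.foldl_append_singleton_eq_map]
  exact List.map_congr_left (fun msg _ => pv_respond_eq msg)
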